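-- pv_equiv track=rewrite | github.com/dpasch01/polarlib | polarlib/parallax/baseline/check_it/psychological.py | _count
-- ===== SOURCE A (Python) =====
-- def _count(text, dictionary):
-- 	_c = 0
-- 	founds = []
--
-- 	for l in list(dictionary):
-- 		if text.find(" " + l + " ") != -1:
-- 			founds.append(l)
-- 			_c = _c + 1
--
-- 	return _c
-- ===== SOURCE B (Python) =====
-- def _count(text, dictionary):
--     n = len(text)
--     lengths = {len(l) for l in dictionary}
--     found = {text[i + 1:i + 1 + L]
--              for i, c in enumerate(text) if c == ' '
--              for L in lengths
--              if i + 1 + L < n and text[i + 1 + L] == ' '}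
--     return sum(1 for l in dictionary if l in found)
-- ===== Notes on version B (the rewrite author's own statement) =====
-- stated objective: faster
-- what changed: Instead of scanning the whole text once per dictionary entry with find, B makes a single pass over the text: at every space position it probes each distinct entry length for a closing space, collects the matched inner substrings in a set, and then counts dictionary entries by one set-membership test each.
import Mathlib
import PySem

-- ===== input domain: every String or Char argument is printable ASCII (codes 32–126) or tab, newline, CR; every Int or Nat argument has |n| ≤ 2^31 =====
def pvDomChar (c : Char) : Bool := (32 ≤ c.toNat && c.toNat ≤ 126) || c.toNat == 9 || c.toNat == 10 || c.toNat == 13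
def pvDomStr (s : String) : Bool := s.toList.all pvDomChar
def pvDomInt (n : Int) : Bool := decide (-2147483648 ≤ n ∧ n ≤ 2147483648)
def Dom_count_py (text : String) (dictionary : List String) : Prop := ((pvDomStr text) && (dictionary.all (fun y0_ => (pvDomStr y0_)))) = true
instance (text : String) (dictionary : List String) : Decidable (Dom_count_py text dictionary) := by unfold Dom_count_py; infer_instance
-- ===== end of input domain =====

-- B replaces A's per-entry scan of the text by a single pass over the text that, at each space,
-- probes each distinct entry length and collects the matched inner substrings in a set
-- (objective: faster — one text pass plus set lookups instead of one full text scan per entry).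

-- ===== PORT A =====
def count_py (text : String) (dictionary : List String) : Int :=
  (dictionary.foldl
    (fun (st : Int × List String) l =>
      if PySem.Str.find text (" " ++ l ++ " ") ≠ -1 then (st.1 + 1, st.2 ++ [l])
      else st)
    (0, [])).1

-- ===== PORT B =====
-- Source B's set comprehension, pre-dedup: for each space position i and each distinct entry
-- length L, the slice text[i+1 : i+1+L] whenever position i+1+L is again a space
def pvFoundList (text : String) (dictionary : List String) : List String :=
  (PySem.List.enumerate text.toList).flatMap (fun ic =>
    if ic.2 = ' ' then
      (PySem.Set.ofList (dictionary.map PySem.Str.len)).filterMap (fun L =>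
        if ic.1 + 1 + L < PySem.Str.len text ∧ PySem.Str.pyGet? text (ic.1 + 1 + L) = some ' ' then
          some (PySem.Str.slice text (some (ic.1 + 1)) (some (ic.1 + 1 + L)))
        else none)
    else [])

def count_py_alt (text : String) (dictionary : List String) : Int :=
  let found : PySem.Set String := PySem.Set.ofList (pvFoundList text dictionary)
  dictionary.foldl (fun s l => if found.contains l then s + 1 else s) 0

-- ===== PRECONDITION & SPEC =====
def Spec_count_py (text : String) (dictionary : List String) (out : Int) : Prop := out = count_py_alt text dictionary
instance (text : String) (dictionary : List String) (out : Int) : Decidable (Spec_count_py text dictionary out) := by unfold Spec_count_py; infer_instance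

-- ===== CLAIM (what is proved, stated in full; the proofs are below) =====
def Claim_equal_count_py : Prop := ∀ (text : String) (dictionary : List String), Dom_count_py text dictionary → Spec_count_py text dictionary (count_py text dictionary)

-- ===== LEMMAS AND PROOFS =====

-- A's pair-state fold projects to a plain counting fold
lemma fold_fst (text : String) (dictionary : List String) :
    ∀ (c : Int) (fs : List String),
      (dictionary.foldl
        (fun (st : Int × List String) l =>
          if PySem.Str.find text (" " ++ l ++ " ") ≠ -1 then (st.1 + 1, st.2 ++ [l])
          else st)
        (c, fs)).1
      = dictionary.foldl
          (fun (s : Int) l => if PySem.Str.find text (" " ++ l ++ " ") ≠ -1 then s + 1 else s) c := by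
  induction dictionary with
  | nil => intro c fs; rfl
  | cons x xs ih =>
      intro c fs
      simp only [List.foldl_cons]
      by_cases h : PySem.Str.find text (" " ++ x ++ " ") ≠ -1 <;>
        simp only [if_pos h, if_neg h] <;> exact ih _ _

-- core combinatorial fact: an occurrence of the padded pattern ' '::ls++[' '] in cs is exactly a
-- pair of space positions k and k+1+m (m = ls.length) whose inner slice is ls
lemma padded_core (cs ls : List Char) (m : Nat) :
    ((' ' :: (ls ++ [' '])) <:+: cs ∧ m = ls.length) ↔
    ∃ k : Nat, k < cs.length ∧ cs[k]? = some ' ' ∧ k + 1 + m < cs.length ∧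
      cs[k + 1 + m]? = some ' ' ∧ (cs.drop (k + 1)).take m = ls := by
  constructor
  · rintro ⟨⟨p, s, h⟩, rfl⟩
    have hlen : cs.length = p.length + (ls.length + 2) + s.length := by
      rw [← h]; simp; omega
    have hdrop : cs.drop p.length = ' ' :: (ls ++ [' ']) ++ s := by
      rw [← h, List.append_assoc, List.drop_left]
    have hdrop1 : cs.drop (p.length + 1) = ls ++ (' ' :: s) := by
      rw [← List.drop_drop, hdrop]
      simp
    refine ⟨p.length, by omega, ?_, by omega, ?_, ?_⟩
    · have h0 : (cs.drop p.length)[0]? = cs[p.length + 0]? := List.getElem?_drop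
      rw [hdrop] at h0
      simpa using h0.symm
    · have h1 : (cs.drop (p.length + 1))[ls.length]? = cs[p.length + 1 + ls.length]? := List.getElem?_drop
      rw [hdrop1] at h1
      rw [← h1]
      simp
    · rw [hdrop1, List.take_left]
  · rintro ⟨k, hk, hck, hkm, hckm, htake⟩
    set t := cs.drop (k + 1) with ht
    have htlen : t.length = cs.length - (k + 1) := by simp [ht]
    have hm : m = ls.length := by
      have := congrArg List.length htake
      simp at this
      omega
    have hmt : m < t.length := by omega
    have hsp : t[m]? = some ' ' := by
      have h2 : (cs.drop (k + 1))[m]? = cs[k + 1 + m]? := List.getElem?_drop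
      rw [ht, h2]; exact hckm
    have htm : t[m]'hmt = ' ' := by
      have := List.getElem?_eq_getElem hmt
      rw [this] at hsp; exact Option.some.inj hsp
    have hdropm : t.drop m = ' ' :: t.drop (m + 1) := by
      rw [List.drop_eq_getElem_cons hmt, htm]
    have ht_decomp : t = ls ++ (' ' :: t.drop (m + 1)) := by
      conv_lhs => rw [← List.take_append_drop m t]
      rw [htake, hdropm]
    have hcsk : cs[k]'hk = ' ' := by
      have := List.getElem?_eq_getElem hk
      rw [this] at hck; exact Option.some.inj hck
    have hdropk : cs.drop k = (' ' :: (ls ++ [' '])) ++ t.drop (m + 1) := by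
      rw [List.drop_eq_getElem_cons hk, hcsk, ← ht]
      conv_lhs => rw [ht_decomp]
      simp
    refine ⟨⟨cs.take k, t.drop (m + 1), ?_⟩, hm⟩
    rw [List.append_assoc, ← hdropk]
    exact List.take_append_drop k cs

lemma key_iff (text : String) (dictionary : List String) (l : String) (hl : l ∈ dictionary) :
    (PySem.Str.find text (" " ++ l ++ " ") ≠ -1) ↔ l ∈ pvFoundList text dictionary := by
  have hfind : (PySem.Str.find text (" " ++ l ++ " ") ≠ -1) ↔
      (' ' :: (l.toList ++ [' '])) <:+: text.toList := by
    rw [Ne, PySem.Str.find_eq_neg_one_iff, not_not]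
    constructor <;> intro h <;> simpa using h
  have hmem : l ∈ pvFoundList text dictionary ↔
      ∃ k : Nat, k < text.toList.length ∧ text.toList[k]? = some ' ' ∧
        ∃ m : Nat, ((m : Int) ∈ dictionary.map PySem.Str.len) ∧
          k + 1 + m < text.toList.length ∧ text.toList[k + 1 + m]? = some ' ' ∧
          ((text.toList.drop (k + 1)).take m = l.toList) := by
    unfold pvFoundList
    rw [List.mem_flatMap]
    constructor
    · rintro ⟨ic, hic, hin⟩
      rw [PySem.List.mem_enumerate_iff] at hic
      obtain ⟨k, hk, rfl⟩ := hic
      dsimp only at hin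
      by_cases hsp : text.toList[k] = ' '
      · rw [if_pos hsp] at hin
        rw [List.mem_filterMap] at hin
        obtain ⟨L, hL, hLs⟩ := hin
        rw [PySem.Set.mem_ofList] at hL
        have hL0 : 0 ≤ L := by
          rw [List.mem_map] at hL
          obtain ⟨w, _, rfl⟩ := hL
          simp [PySem.Str.len_eq]
        obtain ⟨m, rfl⟩ := Int.eq_ofNat_of_zero_le hL0
        split_ifs at hLs with hcond
        · obtain ⟨hlt, hget⟩ := hcond
          refine ⟨k, hk, ?_, m, hL, ?_, ?_, ?_⟩
          · simp [List.getElem?_eq_getElem hk, hsp]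
          · rw [PySem.Str.len_eq] at hlt
            omega
          · rw [PySem.Str.pyGet?_eq, PySem.Chars.pyGet?_eq_listPyGet?] at hget
            rw [show (0 : Int) + k + 1 + m = ((k + 1 + m : Nat) : Int) by push_cast; ring] at hget
            rwa [PySem.List.pyGet?_natCast] at hget
          · have hsl := congrArg String.toList (Option.some.inj hLs)
            rw [PySem.Str.toList_slice, PySem.Chars.slice_eq_listSlice,
              show (0 : Int) + k + 1 = ((k + 1 : Nat) : Int) by push_cast; ring,
              show ((k + 1 : Nat) : Int) + (m : Int) = ((k + 1 : Nat) : Int) + ((m : Nat) : Int) from rfl,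
              PySem.List.slice_natCast_add] at hsl
            exact hsl
      · rw [if_neg hsp] at hin
        simp at hin
    · rintro ⟨k, hk, hck, m, hmL, hkm, hckm, htake⟩
      refine ⟨((0 : Int) + k, text.toList[k]), ?_, ?_⟩
      · rw [PySem.List.mem_enumerate_iff]; exact ⟨k, hk, rfl⟩
      · have hsp : text.toList[k] = ' ' := by
          rw [List.getElem?_eq_getElem hk] at hck; exact Option.some.inj hck
        dsimp only
        rw [if_pos hsp, List.mem_filterMap]
        refine ⟨(m : Int), PySem.Set.mem_ofList _ _ |>.2 hmL, ?_⟩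
        rw [if_pos ?_, Option.some_inj]
        · rw [← String.toList_inj, PySem.Str.toList_slice, PySem.Chars.slice_eq_listSlice]
          rw [show (0 : Int) + k + 1 = ((k + 1 : Nat) : Int) by push_cast; ring,
            show ((k + 1 : Nat) : Int) + (m : Int) = ((k + 1 : Nat) : Int) + ((m : Nat) : Int) from rfl,
            PySem.List.slice_natCast_add]
          exact htake
        · constructor
          · rw [PySem.Str.len_eq]; omega
          · rw [PySem.Str.pyGet?_eq, PySem.Chars.pyGet?_eq_listPyGet?,
              show (0 : Int) + k + 1 + m = ((k + 1 + m : Nat) : Int) by push_cast; ring,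
              PySem.List.pyGet?_natCast]
            exact hckm
  rw [hfind, hmem]
  constructor
  · intro h
    have := (padded_core text.toList l.toList l.toList.length).1 ⟨h, rfl⟩
    obtain ⟨k, h1, h2, h3, h4, h5⟩ := this
    exact ⟨k, h1, h2, l.toList.length, by
      rw [List.mem_map]; exact ⟨l, hl, by simp [PySem.Str.len_eq]⟩, h3, h4, h5⟩
  · rintro ⟨k, h1, h2, m, hmL, h3, h4, h5⟩
    exact ((padded_core text.toList l.toList m).2 ⟨k, h1, h2, h3, h4, h5⟩).1

-- ===== VERDICT (by name: the statement is the Claim_ definition above) =====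
theorem count_py_spec : Claim_equal_count_py := by
  intro text dictionary _
  unfold Spec_count_py count_py count_py_alt
  rw [fold_fst]
  refine PySem.List.foldl_congr_mem _ _ _ _ ?_
  intro acc x hx
  have hiff : (PySem.Str.find text (" " ++ x ++ " ") ≠ -1) ↔
      (PySem.Set.ofList (pvFoundList text dictionary)).contains x = true :=
    (key_iff text dictionary x hx).trans
      ((PySem.Set.mem_ofList _ _).symm.trans (PySem.Set.contains_iff _ _).symm)
  by_cases hp : PySem.Str.find text (" " ++ x ++ " ") ≠ -1
  · rw [if_pos hp, if_pos (hiff.1 hp)]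
  · rw [if_neg hp, if_neg (fun hc => hp (hiff.2 hc))]
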